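-- pv_equiv track=rewrite | github.com/blasfir/srom-1-2 | lab1-2.py | div2
-- ===== SOURCE A (Python) =====
-- w = 32
--
-- def deleteExtraZeros(A):
--     while A and A[-1] == 0:
--         A.pop()
--     if not A:
--         return [0]
--     return A
--
-- def div2(A):
--     if A == [0]:
--         return [0]
--     result = []
--     carry = 0
--     for i in reversed(range(len(A))):
--         current = (carry << w) + A[i]
--         result.append(current // 2)
--         carry = current % 2
--     result.reverse()
--     return deleteExtraZeros(result)
-- ===== SOURCE B (Python) =====
-- w = 32
--
-- def div2(A):
--     # single LSB->MSB pass: each limb is its own floor-half plus the next limb's low bit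
--     n = len(A)
--     result = [A[i] // 2 + (A[i + 1] % 2 if i + 1 < n else 0) * 2 ** (w - 1) for i in range(n)]
--     while len(result) > 1 and result[-1] == 0:
--         result.pop()
--     return result if result else [0]
-- ===== Notes on version B (the rewrite author's own statement) =====
-- stated objective: simpler
-- what changed: Replaces A's reversed MSB-to-LSB loop that propagates a carry through (carry<<32)+limb and then reverses the result with a single forward pass where each output limb is computed independently as A[i]//2 plus the next limb's low bit times 2^31.
import Mathlib
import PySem

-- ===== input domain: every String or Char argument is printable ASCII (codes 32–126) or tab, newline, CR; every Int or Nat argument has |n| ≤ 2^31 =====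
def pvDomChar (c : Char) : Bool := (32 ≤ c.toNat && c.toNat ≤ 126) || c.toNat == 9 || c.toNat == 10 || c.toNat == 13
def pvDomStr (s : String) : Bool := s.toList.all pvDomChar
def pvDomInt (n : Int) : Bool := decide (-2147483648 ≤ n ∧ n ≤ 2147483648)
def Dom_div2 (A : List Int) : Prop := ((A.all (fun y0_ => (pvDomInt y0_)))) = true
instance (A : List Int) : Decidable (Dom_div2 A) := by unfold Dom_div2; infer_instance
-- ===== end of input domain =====

-- B replaces A's MSB→LSB carry-propagation loop by a single forward pass that reads the
-- next limb's low bit directly (objective: simpler/alternative; same O(n) cost).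

-- ===== PORT A =====
-- 'while A and A[-1]==0: A.pop()' pops trailing zeros = dropWhile (== 0) on the reverse (exact)
def deleteExtraZeros (A : List Int) : List Int :=
  let r := (A.reverse.dropWhile (fun x => x == 0)).reverse
  if r = [] then [0] else r

-- one iteration of A's 'for i in reversed(range(len(A)))' body; state = (result, carry)
def divStep (A : List Int) (st : List Int × Int) (i : Int) : List Int × Int :=
  let current := (st.2 <<< 32) + PySem.List.pyGetD A i 0
  (st.1 ++ [PySem.Int.floordiv current 2], PySem.Int.mod current 2)

def div2 (A : List Int) : List Int :=
  if A = [0] then [0]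
  else
    let st := ((PySem.List.pyRange 0 (A.length : Int) 1).reverse).foldl (divStep A) ([], 0)
    deleteExtraZeros st.1.reverse

-- ===== PORT B =====
-- 'while len(result) > 1 and result[-1] == 0: result.pop()' on the reversed list (exact)
def trimTrailing : List Int → List Int
  | a :: b :: t => if a = 0 then trimTrailing (b :: t) else a :: b :: t
  | l => l

def div2_alt (A : List Int) : List Int :=
  let n : Int := A.length
  let result := (PySem.List.pyRange 0 n 1).map (fun i =>
    PySem.Int.floordiv (PySem.List.pyGetD A i 0) 2 +
      (if i + 1 < n then PySem.Int.mod (PySem.List.pyGetD A (i + 1) 0) 2 else 0) * 2147483648)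
  let r := (trimTrailing result.reverse).reverse
  if r = [] then [0] else r

-- ===== PRECONDITION & SPEC =====
def Spec_div2 (A : List Int) (out : List Int) : Prop := out = div2_alt A
instance (A : List Int) (out : List Int) : Decidable (Spec_div2 A out) := by unfold Spec_div2; infer_instance

-- ===== CLAIM (what is proved, stated in full; the proofs are below) =====
def Claim_equal_div2 : Prop := ∀ (A : List Int), Dom_div2 A → Spec_div2 A (div2 A)

-- ===== LEMMAS AND PROOFS =====

-- the per-index value B computes (with the out-of-range next limb read as 0)
def limbHalf (A : List Int) (k : Nat) : Int :=
  PySem.Int.floordiv (PySem.List.pyGetD A (k : Int) 0) 2 +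
    PySem.Int.mod (PySem.List.pyGetD A ((k : Int) + 1) 0) 2 * 2147483648

theorem shift_arith (a c : Int) :
    PySem.Int.floordiv (c <<< 32 + a) 2 = PySem.Int.floordiv a 2 + c * 2147483648 ∧
      PySem.Int.mod (c <<< 32 + a) 2 = PySem.Int.mod a 2 := by
  rw [show (32 : Int) = ((32 : Nat) : Int) from rfl, Int.shiftLeft_eq_mul_pow,
    PySem.Int.floordiv_eq_ediv_of_pos (by norm_num),
    PySem.Int.floordiv_eq_ediv_of_pos (by norm_num),
    PySem.Int.mod_eq_emod_of_pos (by norm_num), PySem.Int.mod_eq_emod_of_pos (by norm_num)]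
  norm_num
  omega

theorem loopA (A : List Int) : ∀ (k : Nat) (acc : List Int),
    ((PySem.List.pyRange 0 (k : Int) 1).reverse).foldl (divStep A)
        (acc, PySem.Int.mod (PySem.List.pyGetD A (k : Int) 0) 2)
      = (acc ++ ((List.range k).map (limbHalf A)).reverse,
         PySem.Int.mod (PySem.List.pyGetD A 0 0) 2) := by
  intro k
  induction k with
  | zero => intro acc; simp [PySem.List.pyRange_one_eq_nil]
  | succ k ih =>
    intro acc
    rw [show ((k + 1 : Nat) : Int) = (k : Int) + 1 by push_cast; ring,
      PySem.List.pyRange_one_succ_right (by positivity)]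
    simp only [List.reverse_append, List.reverse_singleton, List.singleton_append,
      List.foldl_cons]
    have hstep : divStep A (acc, PySem.Int.mod (PySem.List.pyGetD A ((k : Int) + 1) 0) 2) (k : Int)
        = (acc ++ [limbHalf A k], PySem.Int.mod (PySem.List.pyGetD A (k : Int) 0) 2) := by
      simp only [divStep, limbHalf]
      rw [(shift_arith (PySem.List.pyGetD A (k : Int) 0)
            (PySem.Int.mod (PySem.List.pyGetD A ((k : Int) + 1) 0) 2)).1,
          (shift_arith (PySem.List.pyGetD A (k : Int) 0)
            (PySem.Int.mod (PySem.List.pyGetD A ((k : Int) + 1) 0) 2)).2]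
    rw [hstep, ih (acc ++ [limbHalf A k])]
    simp [List.range_succ]

-- both trimming routines, followed by the empty-check, agree
theorem trim_eq (r : List Int) :
    (if (r.dropWhile (fun x => x == 0)).reverse = [] then ([0] : List Int)
       else (r.dropWhile (fun x => x == 0)).reverse)
      = (if (trimTrailing r).reverse = [] then [0] else (trimTrailing r).reverse) := by
  induction r with
  | nil => simp [trimTrailing]
  | cons a t ih =>
    by_cases ha : a = 0
    · subst ha
      cases t with
      | nil => simp [trimTrailing]
      | cons b t' =>
        rw [show trimTrailing (0 :: b :: t') = trimTrailing (b :: t') by simp [trimTrailing]]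
        simpa using ih
    · have h1 : (a :: t).dropWhile (fun x => x == 0) = a :: t := by
        simp [ha]
      have h2 : trimTrailing (a :: t) = a :: t := by
        cases t with
        | nil => rfl
        | cons b t' => simp [trimTrailing, ha]
      rw [h1, h2]

theorem b_entries (A : List Int) :
    (PySem.List.pyRange 0 (A.length : Int) 1).map (fun i =>
        PySem.Int.floordiv (PySem.List.pyGetD A i 0) 2 +
          (if i + 1 < (A.length : Int) then PySem.Int.mod (PySem.List.pyGetD A (i + 1) 0) 2 else 0)
            * 2147483648)
      = (List.range A.length).map (limbHalf A) := by
  rw [PySem.List.pyRange_one]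
  simp only [List.map_map]
  apply List.map_congr_left
  intro k hk
  simp only [List.mem_range] at hk
  simp only [Function.comp, limbHalf, zero_add]
  by_cases h : (k : Int) + 1 < (A.length : Int)
  · simp [h]
  · have hk1 : k + 1 = A.length := by omega
    have : PySem.List.pyGetD A ((k : Int) + 1) 0 = 0 := by
      rw [show ((k : Int) + 1) = ((k + 1 : Nat) : Int) by push_cast; ring,
        PySem.List.pyGetD_natCast]
      simp [hk1]
    simp [h, this]

theorem div2_spec : Claim_equal_div2 := by
  intro A _hdom
  unfold Spec_div2
  by_cases h0 : A = [0]
  · subst h0; decide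
  · unfold div2 div2_alt
    rw [if_neg h0]
    have hc0 : PySem.Int.mod (PySem.List.pyGetD A ((A.length : Nat) : Int) 0) 2 = 0 := by
      rw [PySem.List.pyGetD_natCast]
      simp [List.getD_eq_getElem?_getD]
    have hloop := loopA A A.length []
    rw [hc0] at hloop
    simp only []
    rw [hloop]
    simp only [List.nil_append, List.reverse_reverse, b_entries A]
    unfold deleteExtraZeros
    simp only []
    exact trim_eq _
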